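-- pv_equiv track=rewrite | github.com/Siloq-app/siloq-api | sites/analysis.py | are_synonyms
-- ===== SOURCE A (Python) =====
-- ATTRIBUTE_SYNONYMS = {
--     'rhinestone': {'bling', 'crystal', 'sparkle', 'sequin', 'glitter', 'bedazzle'},
--     'bling': {'rhinestone', 'crystal', 'sparkle', 'sequin', 'glitter'},
--     'custom': {'personalized', 'customized', 'customizable', 'bespoke'},
--     'warm up': {'warmup', 'warm-up', 'tracksuit', 'track suit'},
-- }
--
-- def are_synonyms(word1: str, word2: str) -> bool:
--     """Check if two words are synonyms based on our dictionary."""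
--     w1, w2 = word1.lower(), word2.lower()
--     if w1 == w2:
--         return True
--
--     for key, synonyms in ATTRIBUTE_SYNONYMS.items():
--         all_words = {key} | synonyms
--         if w1 in all_words and w2 in all_words:
--             return True
--
--     return False
-- ===== SOURCE B (Python) =====
-- ATTRIBUTE_SYNONYMS = {
--     'rhinestone': {'bling', 'crystal', 'sparkle', 'sequin', 'glitter', 'bedazzle'},
--     'bling': {'rhinestone', 'crystal', 'sparkle', 'sequin', 'glitter'},
--     'custom': {'personalized', 'customized', 'customizable', 'bespoke'},
--     'warm up': {'warmup', 'warm-up', 'tracksuit', 'track suit'},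
-- }
--
-- # Inverse index built once at module load: word -> set of group keys it belongs to.
-- _INDEX: dict = {}
-- for _key, _syns in ATTRIBUTE_SYNONYMS.items():
--     for _w in sorted({_key} | _syns):
--         _INDEX.setdefault(_w, set()).add(_key)
--
--
-- def are_synonyms(word1: str, word2: str) -> bool:
--     """Check if two words are synonyms based on our dictionary."""
--     w1, w2 = word1.lower(), word2.lower()
--     if w1 == w2:
--         return True
--     return not _INDEX.get(w1, set()).isdisjoint(_INDEX.get(w2, set()))
-- ===== Notes on version B (the rewrite author's own statement) =====
-- stated objective: idiomatic
-- what changed: Replaces the per-call scan over every synonym group (rebuilding each group's word set on every call) by an inverse index word->set-of-group-keys built once at module load; each call is two dict lookups plus a set-disjointness test.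
import Mathlib
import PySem

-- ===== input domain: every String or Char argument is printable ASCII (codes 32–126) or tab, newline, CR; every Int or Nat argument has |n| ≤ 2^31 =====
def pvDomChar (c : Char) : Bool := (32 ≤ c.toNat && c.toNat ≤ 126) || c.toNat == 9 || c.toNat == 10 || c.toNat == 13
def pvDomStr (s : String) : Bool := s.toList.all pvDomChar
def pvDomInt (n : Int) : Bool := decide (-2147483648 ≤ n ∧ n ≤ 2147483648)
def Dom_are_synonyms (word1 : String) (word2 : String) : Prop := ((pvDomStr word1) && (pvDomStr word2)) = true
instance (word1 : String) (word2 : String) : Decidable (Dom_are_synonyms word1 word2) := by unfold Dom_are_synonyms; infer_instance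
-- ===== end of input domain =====

-- B replaces A's per-call scan over every synonym group by an inverse index
-- (word -> set of group keys) built once; each call is two lookups + a disjointness test.

-- ===== PORT A =====
def ATTRIBUTE_SYNONYMS : List (String × PySem.Set String) := [
  ("rhinestone", PySem.Set.ofList ["bling", "crystal", "sparkle", "sequin", "glitter", "bedazzle"]),
  ("bling", PySem.Set.ofList ["rhinestone", "crystal", "sparkle", "sequin", "glitter"]),
  ("custom", PySem.Set.ofList ["personalized", "customized", "customizable", "bespoke"]),
  ("warm up", PySem.Set.ofList ["warmup", "warm-up", "tracksuit", "track suit"])]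

-- the 'for key, synonyms in ATTRIBUTE_SYNONYMS.items():' loop with its early 'return True'
def aLoop (w1 w2 : String) : List (String × PySem.Set String) → Bool
  | [] => false
  | (key, synonyms) :: rest =>
    let allWords := PySem.Set.union (PySem.Set.ofList [key]) synonyms
    if PySem.Set.contains allWords w1 && PySem.Set.contains allWords w2 then true
    else aLoop w1 w2 rest

def are_synonyms (word1 : String) (word2 : String) : Bool :=
  let w1 := PySem.Str.lower word1
  let w2 := PySem.Str.lower word2
  if w1 == w2 then true
  else aLoop w1 w2 ATTRIBUTE_SYNONYMS

-- ===== PORT B =====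
-- the module-load index build: _INDEX.setdefault(w, set()).add(key) for w in sorted({key} | syns)
def pvIndex : PySem.Dict String (PySem.Set String) :=
  ATTRIBUTE_SYNONYMS.foldl
    (fun d p =>
      (PySem.List.sorted (PySem.Set.union (PySem.Set.ofList [p.1]) p.2) (fun x => x) false).foldl
        (fun d w => d.insert w (PySem.Set.add (d.getD w PySem.Set.empty) p.1)) d)
    PySem.Dict.empty

def are_synonyms_alt (word1 : String) (word2 : String) : Bool :=
  let w1 := PySem.Str.lower word1
  let w2 := PySem.Str.lower word2
  if w1 == w2 then true
  else !(PySem.Set.isdisjoint (pvIndex.getD w1 PySem.Set.empty) (pvIndex.getD w2 PySem.Set.empty))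

-- ===== PRECONDITION & SPEC =====
def Spec_are_synonyms (word1 : String) (word2 : String) (out : Bool) : Prop := out = are_synonyms_alt word1 word2
instance (word1 : String) (word2 : String) (out : Bool) : Decidable (Spec_are_synonyms word1 word2 out) := by unfold Spec_are_synonyms; infer_instance

-- ===== CLAIM (what is proved, stated in full; the proofs are below) =====
def Claim_equal_are_synonyms : Prop := ∀ (word1 : String) (word2 : String), Dom_are_synonyms word1 word2 → Spec_are_synonyms word1 word2 (are_synonyms word1 word2)

-- ===== LEMMAS AND PROOFS =====

-- A's loop is an existential scan over the groups
theorem aLoop_eq_any (w1 w2 : String) (G : List (String × PySem.Set String)) :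
    aLoop w1 w2 G = G.any (fun p =>
      PySem.Set.contains (PySem.Set.union (PySem.Set.ofList [p.1]) p.2) w1 &&
      PySem.Set.contains (PySem.Set.union (PySem.Set.ofList [p.1]) p.2) w2) := by
  induction G with
  | nil => rfl
  | cons p rest ih =>
    obtain ⟨key, syns⟩ := p
    simp only [aLoop, List.any_cons]
    by_cases h : (PySem.Set.contains (PySem.Set.union (PySem.Set.ofList [key]) syns) w1 &&
                  PySem.Set.contains (PySem.Set.union (PySem.Set.ofList [key]) syns) w2) = true
    · rw [if_pos h, h, Bool.true_or]
    · rw [if_neg h, Bool.not_eq_true] at *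
      rw [h, Bool.false_or, ih]

-- membership in the index value after one group's inner word loop
theorem mem_getD_inner (k0 : String) (ws : List String) (d : PySem.Dict String (PySem.Set String))
    (w k : String) :
    k ∈ (ws.foldl (fun d w => d.insert w (PySem.Set.add (d.getD w PySem.Set.empty) k0)) d).getD w PySem.Set.empty ↔
      k ∈ d.getD w PySem.Set.empty ∨ (k = k0 ∧ w ∈ ws) := by
  induction ws generalizing d with
  | nil => simp
  | cons w' rest ih =>
    simp only [List.foldl_cons, ih, PySem.Dict.getD_insert]
    by_cases hw : w = w'
    · subst hw
      simp [PySem.Set.mem_add]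
      tauto
    · simp [hw]

-- membership in the index value after the whole build loop
theorem mem_getD_build (G : List (String × PySem.Set String))
    (d : PySem.Dict String (PySem.Set String)) (w k : String) :
    k ∈ (G.foldl
      (fun d p =>
        (PySem.List.sorted (PySem.Set.union (PySem.Set.ofList [p.1]) p.2) (fun x => x) false).foldl
          (fun d w => d.insert w (PySem.Set.add (d.getD w PySem.Set.empty) p.1)) d)
      d).getD w PySem.Set.empty ↔
      k ∈ d.getD w PySem.Set.empty ∨
        ∃ p ∈ G, p.1 = k ∧ (PySem.Set.union (PySem.Set.ofList [p.1]) p.2).contains w := by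
  induction G generalizing d with
  | nil => simp
  | cons p rest ih =>
    simp only [List.foldl_cons, ih, mem_getD_inner, PySem.List.mem_sorted,
      PySem.Set.contains_iff, List.mem_cons]
    constructor
    · rintro ((h | ⟨hk, hw⟩) | ⟨q, hq, hqk, hqw⟩)
      · exact Or.inl h
      · exact Or.inr ⟨p, Or.inl rfl, hk.symm, hw⟩
      · exact Or.inr ⟨q, Or.inr hq, hqk, hqw⟩
    · rintro (h | ⟨q, hq | hq, hqk, hqw⟩)
      · exact Or.inl (Or.inl h)
      · subst hq; exact Or.inl (Or.inr ⟨hqk.symm, hqw⟩)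
      · exact Or.inr ⟨q, hq, hqk, hqw⟩

-- the two call-time computations agree
theorem scan_eq_index (w1 w2 : String) :
    aLoop w1 w2 ATTRIBUTE_SYNONYMS =
      !(PySem.Set.isdisjoint (pvIndex.getD w1 PySem.Set.empty) (pvIndex.getD w2 PySem.Set.empty)) := by
  have hnd : (ATTRIBUTE_SYNONYMS.map Prod.fst).Nodup := by decide
  rw [Bool.eq_iff_iff, aLoop_eq_any, List.any_eq_true]
  rw [Bool.not_eq_true', ← Bool.not_eq_true, PySem.Set.isdisjoint_iff]
  push Not
  simp only [pvIndex, mem_getD_build, PySem.Dict.getD_empty]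
  simp only [PySem.Set.empty, List.not_mem_nil, false_or, Bool.and_eq_true, PySem.Set.contains_iff]
  constructor
  · rintro ⟨p, hp, h1, h2⟩
    exact ⟨p.1, ⟨p, hp, rfl, h1⟩, ⟨p, hp, rfl, h2⟩⟩
  · rintro ⟨k, ⟨p, hp, hpk, hpw⟩, ⟨q, hq, hqk, hqw⟩⟩
    have hpq : p = q := List.inj_on_of_nodup_map hnd hp hq (by rw [hpk, hqk])
    subst hpq
    exact ⟨p, hp, hpw, hqw⟩

-- ===== VERDICT (by name: the statement is the Claim_ definition above) =====
theorem are_synonyms_spec : Claim_equal_are_synonyms := by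
  intro word1 word2 _
  unfold Spec_are_synonyms are_synonyms are_synonyms_alt
  by_cases h : PySem.Str.lower word1 == PySem.Str.lower word2
  · simp [h]
  · simp only [h, Bool.false_eq_true, if_false]
    exact scan_eq_index _ _
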